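-- pv_equiv track=rewrite | github.com/xenosdio/adventofcode | 2021/day03/part_two.py | are_ones_more_than_zeroes
-- ===== SOURCE A (Python) =====
-- def are_ones_more_than_zeroes(ratings, i):
--     sum = 0
--     for rating in ratings:
--         if rating[i] == "1":
--             sum += 1
--         else:
--             sum -= 1
--
--     return sum >= 0
-- ===== SOURCE B (Python) =====
-- def are_ones_more_than_zeroes(ratings, i):
--     flags = [rating[i] == "1" for rating in ratings]
--
--     def balance(fs):
--         if not fs:
--             return 0
--         if len(fs) == 1:
--             return 1 if fs[0] else -1
--         m = len(fs) // 2
--         return balance(fs[:m]) + balance(fs[m:])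
--
--     return balance(flags) >= 0
-- ===== Notes on version B (the rewrite author's own statement) =====
-- stated objective: alternative
-- what changed: Replaces A's single accumulator loop by a two-stage algorithm: materialize the boolean flags rating[i]=='1', then compute the signed balance by divide-and-conquer recursion (split the list in half, recurse on both halves, add), finally test >= 0.
import Mathlib
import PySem

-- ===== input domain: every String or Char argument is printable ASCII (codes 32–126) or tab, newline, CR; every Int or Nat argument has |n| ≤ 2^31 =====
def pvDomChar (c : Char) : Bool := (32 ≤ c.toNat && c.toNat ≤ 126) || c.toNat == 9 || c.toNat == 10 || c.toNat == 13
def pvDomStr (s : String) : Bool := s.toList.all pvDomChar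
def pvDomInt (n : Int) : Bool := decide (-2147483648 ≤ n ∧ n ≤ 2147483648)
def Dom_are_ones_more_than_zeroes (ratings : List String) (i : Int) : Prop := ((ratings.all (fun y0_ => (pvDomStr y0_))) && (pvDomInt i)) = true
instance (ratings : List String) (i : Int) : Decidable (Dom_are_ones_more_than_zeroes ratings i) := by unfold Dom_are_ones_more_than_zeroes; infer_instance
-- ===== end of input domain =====

-- B computes the same answer by a two-stage divide-and-conquer: it first materializes
-- the flags rating[i]=='1', then sums their ±1 balance by recursive halving (alternative).


-- ===== PORT A =====
def are_ones_more_than_zeroes (ratings : List String) (i : Int) : Bool :=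
  let sum : Int := ratings.foldl
    (fun sum rating =>
      if PySem.Str.pyGet? rating i = some '1' then sum + 1 else sum - 1) 0
  decide (sum ≥ 0)

-- ===== PORT B =====
-- balance(fs): divide-and-conquer sum of ±1 over the flag list, as in Source B.
def pvBalance (fs : List Bool) : Int :=
  if _h0 : fs = [] then 0
  else if _h1 : fs.length = 1 then (if fs.head! then 1 else -1)
  else
    let m := fs.length / 2
    pvBalance (fs.take m) + pvBalance (fs.drop m)
termination_by fs.length
decreasing_by
  · have : fs.length ≥ 2 := by
      cases fs with
      | nil => simp at _h0
      | cons a t => cases t with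
        | nil => simp at _h1
        | cons b u => simp
    simp only [List.length_take]
    omega
  · have : fs.length ≥ 2 := by
      cases fs with
      | nil => simp at _h0
      | cons a t => cases t with
        | nil => simp at _h1
        | cons b u => simp
    simp only [List.length_drop]
    omega

def are_ones_more_than_zeroes_alt (ratings : List String) (i : Int) : Bool :=
  let flags : List Bool := ratings.map (fun rating => PySem.Str.pyGet? rating i == some '1')
  decide (pvBalance flags ≥ 0)

-- ===== PRECONDITION & SPEC =====
-- Pre_ excludes exactly the inputs where Python A raises IndexError: some rating has no character at index i.
def Pre_are_ones_more_than_zeroes (ratings : List String) (i : Int) : Prop :=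
  ∀ r ∈ ratings, -(r.toList.length : Int) ≤ i ∧ i < r.toList.length
instance (ratings : List String) (i : Int) : Decidable (Pre_are_ones_more_than_zeroes ratings i) := by unfold Pre_are_ones_more_than_zeroes; infer_instance
def pvWitness_are_ones_more_than_zeroes : List String × Int := (["10", "01", "11"], 1)
def Spec_are_ones_more_than_zeroes (ratings : List String) (i : Int) (out : Bool) : Prop := out = are_ones_more_than_zeroes_alt ratings i
instance (ratings : List String) (i : Int) (out : Bool) : Decidable (Spec_are_ones_more_than_zeroes ratings i out) := by unfold Spec_are_ones_more_than_zeroes; infer_instance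

-- ===== CLAIM (what is proved, stated in full; the proofs are below) =====
def Claim_equal_are_ones_more_than_zeroes : Prop := ∀ (ratings : List String) (i : Int), Dom_are_ones_more_than_zeroes ratings i → Pre_are_ones_more_than_zeroes ratings i → Spec_are_ones_more_than_zeroes ratings i (are_ones_more_than_zeroes ratings i)

-- ===== LEMMAS AND PROOFS =====
-- The divide-and-conquer balance equals the sum of the mapped ±1 list.
theorem pvBalance_eq_sum (fs : List Bool) :
    pvBalance fs = (fs.map (fun f => if f then (1 : Int) else -1)).sum := by
  induction fs using pvBalance.induct with
  | case1 => simp [pvBalance]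
  | case2 fs h0 h1 hh =>
    rw [pvBalance, dif_neg h0, dif_pos h1, if_pos hh]
    cases fs with
    | nil => simp at h0
    | cons a t =>
      have ht : t = [] := by simpa using h1
      subst ht
      simp only [List.head!] at hh
      simp [hh]
  | case3 fs h0 h1 hh =>
    rw [pvBalance, dif_neg h0, dif_pos h1, if_neg hh]
    cases fs with
    | nil => simp at h0
    | cons a t =>
      have ht : t = [] := by simpa using h1
      subst ht
      simp only [List.head!] at hh
      simp [hh]
  | case4 fs h0 h1 m ih1 ih2 =>
    rw [pvBalance, dif_neg h0, dif_neg h1]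
    show pvBalance (fs.take m) + pvBalance (fs.drop m) = _
    rw [ih1, ih2]
    rw [← List.sum_append, ← List.map_append, List.take_append_drop]

-- A's fold equals the same sum (generalized over the accumulator).
theorem foldA_eq_sum (i : Int) (l : List String) (s : Int) :
    l.foldl (fun sum rating =>
        if PySem.Str.pyGet? rating i = some '1' then sum + 1 else sum - 1) s
    = s + ((l.map (fun r => PySem.Str.pyGet? r i == some '1')).map
        (fun f => if f then (1 : Int) else -1)).sum := by
  induction l generalizing s with
  | nil => simp
  | cons x xs ih =>
    simp only [List.foldl_cons, List.map_cons, List.sum_cons, ih]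
    by_cases h : PySem.Str.pyGet? x i = some '1'
    · have hb : (PySem.Str.pyGet? x i == some '1') = true := by simp only [beq_iff_eq]; exact h
      rw [if_pos h, hb]
      simp only [if_true]
      omega
    · have hb : (PySem.Str.pyGet? x i == some '1') = false := by simp only [beq_eq_false_iff_ne, ne_eq]; exact h
      rw [if_neg h, hb]
      simp only [Bool.false_eq_true, if_false]
      omega

theorem are_ones_more_than_zeroes_agree (ratings : List String) (i : Int) :
    are_ones_more_than_zeroes ratings i = are_ones_more_than_zeroes_alt ratings i := by
  show decide ((ratings.foldl (fun sum rating =>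
      if PySem.Str.pyGet? rating i = some '1' then sum + 1 else sum - 1) 0) ≥ 0)
    = decide (pvBalance (ratings.map (fun rating => PySem.Str.pyGet? rating i == some '1')) ≥ 0)
  rw [foldA_eq_sum, pvBalance_eq_sum, zero_add]

-- ===== VERDICT (by name: the statement is the Claim_ definition above) =====
theorem are_ones_more_than_zeroes_spec : Claim_equal_are_ones_more_than_zeroes := by
  intro ratings i _ _
  unfold Spec_are_ones_more_than_zeroes
  exact are_ones_more_than_zeroes_agree ratings i
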